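-- pv_equiv track=rewrite | github.com/ggboy-nna/d192y | ms_token.py | count_to_text
-- ===== SOURCE A (Python) =====
-- def count_to_text(deci_num, ac_signature):
--     off_list = [24, 18, 12, 6, 0]
--     for value in off_list:
--         key_num = (deci_num >> value) & 63
--         if key_num < 26:
--             val_num = 65
--         elif key_num < 52:
--             val_num = 71
--         elif key_num < 62:
--             val_num = -4
--         else:
--             val_num = -17
--         ascii_code = key_num + val_num
--         ac_signature += chr(ascii_code)
--     return ac_signature
-- ===== SOURCE B (Python) =====
-- def count_to_text(deci_num, ac_signature):
--     alphabet = "ABCDEFGHIJKLMNOPQRSTUVWXYZabcdefghijklmnopqrstuvwxyz0123456789-."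
--     m = deci_num % (1 << 30)
--     digits = ""
--     for _ in range(5):
--         m, r = divmod(m, 64)
--         digits = alphabet[r] + digits
--     return ac_signature + digits
-- ===== Notes on version B (the rewrite author's own statement) =====
-- stated objective: alternative
-- what changed: Instead of extracting each 6-bit field with a shift-and-mask and mapping it through an if/elif ASCII-offset chain, B reduces the number once modulo 2^30 and peels base-64 digits off the low end with repeated divmod, prepending each looked-up alphabet character to build the 5-char suffix back-to-front.
import Mathlib
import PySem

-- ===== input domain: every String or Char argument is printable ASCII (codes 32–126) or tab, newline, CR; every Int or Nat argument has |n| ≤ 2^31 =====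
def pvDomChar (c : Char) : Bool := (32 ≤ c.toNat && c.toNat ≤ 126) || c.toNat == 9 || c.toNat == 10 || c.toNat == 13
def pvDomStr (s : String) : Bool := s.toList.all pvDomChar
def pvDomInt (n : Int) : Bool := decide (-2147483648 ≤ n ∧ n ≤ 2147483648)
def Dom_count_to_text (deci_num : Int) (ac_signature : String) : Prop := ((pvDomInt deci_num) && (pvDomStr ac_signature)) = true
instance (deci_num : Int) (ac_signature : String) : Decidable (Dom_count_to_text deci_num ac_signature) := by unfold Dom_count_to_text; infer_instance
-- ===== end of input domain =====

-- B builds the 5-char suffix back-to-front by repeated divmod on deci_num mod 2^30 with an alphabet table, instead of A's per-position shift/mask with an if/elif ASCII-offset chain (alternative decomposition).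


-- ===== PORT A =====
-- chr(ascii_code) is ported as Char.ofNat ascii_code.toNat: exact here since ascii_code is always in 45..122.
def count_to_text (deci_num : Int) (ac_signature : String) : String :=
  let off_list : List Nat := [24, 18, 12, 6, 0]
  String.ofList (off_list.foldl (fun acc (value : Nat) =>
    let key_num : Int := PySem.Int.band (deci_num >>> value) 63
    let val_num : Int :=
      if key_num < 26 then 65
      else if key_num < 52 then 71
      else if key_num < 62 then -4
      else -17
    let ascii_code := key_num + val_num
    acc ++ [Char.ofNat ascii_code.toNat]) ac_signature.toList)

-- ===== PORT B =====
-- alphabet[r]: ported as getD; r = m % 64 is always 0..63, in range, so Python never raises here.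
-- divmod(m, 64) is ported as the pair (floordiv m 64, mod m 64): exact since 64 ≠ 0.
def pvAlphabet : List Char :=
  "ABCDEFGHIJKLMNOPQRSTUVWXYZabcdefghijklmnopqrstuvwxyz0123456789-.".toList

def count_to_text_alt (deci_num : Int) (ac_signature : String) : String :=
  let m0 : Int := PySem.Int.mod deci_num ((1:Int) <<< 30)
  let st :=
    (PySem.List.pyRange 0 5 1).foldl
      (fun (st : Int × List Char) _ =>
        let q := PySem.Int.floordiv st.1 64
        let r := PySem.Int.mod st.1 64
        (q, pvAlphabet.getD r.toNat 'A' :: st.2))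
      (m0, [])
  String.ofList (ac_signature.toList ++ st.2)

-- ===== PRECONDITION & SPEC =====
def Spec_count_to_text (deci_num : Int) (ac_signature : String) (out : String) : Prop := out = count_to_text_alt deci_num ac_signature
instance (deci_num : Int) (ac_signature : String) (out : String) : Decidable (Spec_count_to_text deci_num ac_signature out) := by unfold Spec_count_to_text; infer_instance

-- ===== CLAIM (what is proved, stated in full; the proofs are below) =====
def Claim_equal_count_to_text : Prop := ∀ (deci_num : Int) (ac_signature : String), Dom_count_to_text deci_num ac_signature → Spec_count_to_text deci_num ac_signature (count_to_text deci_num ac_signature)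

-- ===== LEMMAS AND PROOFS =====

-- Python's a & 63 is a mod 64, for every (also negative) a.
theorem pv_band63 (a : Int) : PySem.Int.band a 63 = a % 64 := by
  have h1 : a.toNat &&& 63 = a.toNat % 64 := by
    simpa using Nat.and_two_pow_sub_one_eq_mod a.toNat 6
  have h2 : 63 &&& (-a-1).toNat = (-a-1).toNat % 64 := by
    rw [Nat.and_comm]; simpa using Nat.and_two_pow_sub_one_eq_mod (-a-1).toNat 6
  unfold PySem.Int.band
  simp only [show (63:Int).toNat = 63 from rfl]
  split_ifs with ha hb hb <;> omega

-- A's field (d >> 6k) & 63 is the k-th base-64 digit of d mod 2^30, B's repeated-division remainder.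
theorem pv_key24 (d : Int) :
    PySem.Int.band (d >>> (24:Nat)) 63 = (d % 1073741824)/64/64/64/64 % 64 := by
  rw [pv_band63, Int.shiftRight_eq_div_pow,
    show (((2:Nat)^(24:Nat) : Nat) : Int) = 16777216 from by norm_num]
  omega

theorem pv_key18 (d : Int) :
    PySem.Int.band (d >>> (18:Nat)) 63 = (d % 1073741824)/64/64/64 % 64 := by
  rw [pv_band63, Int.shiftRight_eq_div_pow,
    show (((2:Nat)^(18:Nat) : Nat) : Int) = 262144 from by norm_num]
  omega

theorem pv_key12 (d : Int) :
    PySem.Int.band (d >>> (12:Nat)) 63 = (d % 1073741824)/64/64 % 64 := by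
  rw [pv_band63, Int.shiftRight_eq_div_pow,
    show (((2:Nat)^(12:Nat) : Nat) : Int) = 4096 from by norm_num]
  omega

theorem pv_key6 (d : Int) :
    PySem.Int.band (d >>> (6:Nat)) 63 = (d % 1073741824)/64 % 64 := by
  rw [pv_band63, Int.shiftRight_eq_div_pow,
    show (((2:Nat)^(6:Nat) : Nat) : Int) = 64 from by norm_num]
  omega

theorem pv_key0 (d : Int) :
    PySem.Int.band (d >>> (0:Nat)) 63 = (d % 1073741824) % 64 := by
  rw [pv_band63, Int.shiftRight_eq_div_pow,
    show (((2:Nat)^(0:Nat) : Nat) : Int) = 1 from by norm_num, Int.ediv_one]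
  omega

-- per-character agreement: A's offset arithmetic equals B's table lookup on 0..63
theorem pv_char_eq (k : Int) (h0 : 0 ≤ k) (h63 : k ≤ 63) :
    Char.ofNat (k + (if k < 26 then (65:Int) else if k < 52 then 71 else if k < 62 then -4 else -17)).toNat
      = pvAlphabet.getD k.toNat 'A' := by
  obtain ⟨n, rfl⟩ := Int.eq_ofNat_of_zero_le h0
  have hn : n ≤ 63 := by exact_mod_cast h63
  interval_cases n <;> decide

theorem pv_char_mod (x : Int) :
    Char.ofNat ((x % 64) + (if x % 64 < 26 then (65:Int) else if x % 64 < 52 then 71 else if x % 64 < 62 then -4 else -17)).toNat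
      = pvAlphabet.getD (x % 64).toNat 'A' :=
  pv_char_eq _ (Int.emod_nonneg x (by norm_num)) (by omega)

-- ===== VERDICT (by name: the statement is the Claim_ definition above) =====
theorem count_to_text_spec : Claim_equal_count_to_text := by
  intro d s _
  show count_to_text d s = count_to_text_alt d s
  have hrange : PySem.List.pyRange 0 5 1 = [0, 1, 2, 3, 4] := by decide
  have hm0 : PySem.Int.mod d ((1:Int) <<< 30) = d % 1073741824 := by
    rw [PySem.Int.mod_eq_emod_of_pos (by decide : (0:Int) < (1:Int) <<< 30),
      show ((1:Int) <<< 30) = 1073741824 from by decide]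
  simp only [count_to_text, count_to_text_alt, hrange, List.foldl, hm0,
    PySem.Int.floordiv_eq_ediv_of_pos (by norm_num : (0:Int) < 64),
    PySem.Int.mod_eq_emod_of_pos (by norm_num : (0:Int) < 64),
    pv_key24, pv_key18, pv_key12, pv_key6, pv_key0, pv_char_mod,
    List.append_assoc, List.cons_append, List.nil_append]
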